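-- pv_equiv track=rewrite | github.com/cgarcia-UCO/Excepcional-coverage-and-description-diversity-CARM | scripts/results2latex.py | remove_first
-- ===== SOURCE A (Python) =====
-- def remove_first(x):
--     result = '\{'
--     num_commas = 0
--     for i in x:
--         if num_commas >= 2 and i != '.' and i != ']':
--             result +=i
--         elif num_commas >= 2 and i == ']':
--             result +='\}'
--         if i == ',':
--             num_commas += 1
--     return result
-- ===== SOURCE B (Python) =====
-- def remove_first(x):
--     # locate the position just past the second comma (end of string if fewer)
--     k = 2
--     i = 0
--     while k > 0 and i < len(x):
--         if x[i] == ',':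
--             k -= 1
--         i += 1
--     rest = x[i:]
--     return '\{' + ''.join('\}' if c == ']' else c for c in rest if c != '.')
-- ===== Notes on version B (the rewrite author's own statement) =====
-- stated objective: simpler
-- what changed: B first locates the tail after the second comma with a recursive skip helper, then transforms only that tail with a filter/join pass, instead of A's single whole-string loop maintaining a comma counter and a three-way append.
import Mathlib
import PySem

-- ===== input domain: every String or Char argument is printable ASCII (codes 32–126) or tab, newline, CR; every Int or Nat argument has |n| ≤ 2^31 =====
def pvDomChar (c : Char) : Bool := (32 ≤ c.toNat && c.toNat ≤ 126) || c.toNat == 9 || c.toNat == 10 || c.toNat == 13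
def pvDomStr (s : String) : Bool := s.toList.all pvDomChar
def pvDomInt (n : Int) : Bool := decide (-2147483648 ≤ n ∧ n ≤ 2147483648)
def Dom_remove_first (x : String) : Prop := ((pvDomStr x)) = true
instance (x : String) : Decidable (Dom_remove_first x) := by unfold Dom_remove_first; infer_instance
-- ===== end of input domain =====

-- B replaces A's whole-string loop with a comma counter by a recursive skip past the
-- second comma followed by a filter/flatMap transform of only the tail (objective: simpler).

-- ===== PORT A =====
-- literal transliteration of A: one fold over the characters carrying (result, num_commas)
def rfStepA (st : List Char × Int) (i : Char) : List Char × Int :=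
  let r :=
    if 2 ≤ st.2 ∧ i ≠ '.' ∧ i ≠ ']' then st.1 ++ [i]
    else if 2 ≤ st.2 ∧ i = ']' then st.1 ++ ['\\', '}']
    else st.1
  (r, if i = ',' then st.2 + 1 else st.2)

def remove_first (x : String) : String :=
  String.ofList (x.toList.foldl rfStepA ("\\{".toList, 0)).1

-- ===== PORT B =====
-- drop characters up to and including the k-th comma (all of s if fewer) — Source B's skip2
def rfSkip : List Char → Nat → List Char
  | s, 0 => s
  | [], _ + 1 => []
  | c :: rest, k + 1 => rfSkip rest (if c = ',' then k else k + 1)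

def remove_first_alt (x : String) : String :=
  "\\{" ++ String.ofList
    (((rfSkip x.toList 2).filter (fun c => c ≠ '.')).flatMap
      (fun c => if c = ']' then ['\\', '}'] else [c]))

-- ===== PRECONDITION & SPEC =====
def Spec_remove_first (x : String) (out : String) : Prop := out = remove_first_alt x
instance (x : String) (out : String) : Decidable (Spec_remove_first x out) := by unfold Spec_remove_first; infer_instance

-- ===== CLAIM (what is proved, stated in full; the proofs are below) =====
def Claim_equal_remove_first : Prop := ∀ (x : String), Dom_remove_first x → Spec_remove_first x (remove_first x)

-- ===== LEMMAS AND PROOFS =====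

-- B's transform of a character list
def rfTrans (l : List Char) : List Char :=
  (l.filter (fun c => c ≠ '.')).flatMap (fun c => if c = ']' then ['\\', '}'] else [c])

theorem rfTrans_cons (c : Char) (l : List Char) :
    rfTrans (c :: l) =
      (if c = '.' then [] else if c = ']' then ['\\', '}'] else [c]) ++ rfTrans l := by
  by_cases h1 : c = '.' <;> by_cases h2 : c = ']' <;>
    simp_all [rfTrans]

-- once the counter is ≥ 2, the fold appends exactly the transform of the remaining list
theorem foldA_ge2 (l : List Char) (r : List Char) (n : Int) (hn : 2 ≤ n) :
    (l.foldl rfStepA (r, n)).1 = r ++ rfTrans l := by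
  induction l generalizing r n with
  | nil => simp [rfTrans]
  | cons c rest ih =>
    have hn' : 2 ≤ (if c = ',' then n + 1 else n) := by split <;> omega
    by_cases h1 : c = '.' <;> by_cases h2 : c = ']' <;>
      simp_all [List.foldl_cons, rfStepA, rfTrans_cons, ih _ _ hn']

-- when the counter is still below 2, a step emits nothing and only updates the counter
theorem rfStepA_lt (r : List Char) (n : Int) (c : Char) (h : ¬ 2 ≤ n) :
    rfStepA (r, n) c = (r, if c = ',' then n + 1 else n) := by
  simp [rfStepA, h]

-- while k commas (k ≤ 2) remain to be seen, the fold appends the transform of the skipped tail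
theorem foldA_skip (l : List Char) (r : List Char) (k : Nat) (hk : k ≤ 2) :
    (l.foldl rfStepA (r, (2 : Int) - k)).1 = r ++ rfTrans (rfSkip l k) := by
  induction l generalizing r k with
  | nil =>
    cases k with
    | zero => simp [rfSkip, rfTrans]
    | succ k => simp [rfSkip, rfTrans]
  | cons c rest ih =>
    cases k with
    | zero => exact foldA_ge2 _ _ _ (by norm_num)
    | succ k =>
      have hlt : ¬ (2 ≤ (2 : Int) - (k + 1 : Nat)) := by push_cast; omega
      rw [List.foldl_cons, rfStepA_lt _ _ _ hlt]
      by_cases hc : c = ','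
      · rw [if_pos hc, show (2 : Int) - (k + 1 : Nat) + 1 = 2 - k by push_cast; ring,
          ih r k (by omega)]
        simp [rfSkip, hc]
      · rw [if_neg hc, ih r (k + 1) hk]
        simp [rfSkip, hc]

-- ===== VERDICT (by name: the statement is the Claim_ definition above) =====
theorem remove_first_spec : Claim_equal_remove_first := by
  intro x _
  show remove_first x = remove_first_alt x
  unfold remove_first remove_first_alt
  have h := foldA_skip x.toList ("\\{".toList) 2 (le_refl 2)
  norm_num at h
  rw [h]
  rw [String.ofList_append]
  rfl
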